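-- pv_equiv track=rewrite | github.com/jpmedras/attemps_net | src/models/graph_students.py | _commom_questions
-- ===== SOURCE A (Python) =====
-- def _commom_questions(student_questions):
--     commom = {}
--
--     for student_u, questions_u in student_questions.items():
--         for student_v, questions_v in student_questions.items():
--             if student_u not in commom:
--                 commom[student_u] = {}
--
--             commom[student_u][student_v] = len(questions_u & questions_v)
--
--     return commom
-- ===== SOURCE B (Python) =====
-- def _commom_questions(student_questions):
--     # Inverted index: instead of intersecting every pair of question sets,
--     # build holders[q] = students having question q, start from an all-zero
--     # matrix and, per question, increment every co-holder pair once.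
--     items = list(student_questions.items())
--     commom = {u: {v: 0 for v, _ in items} for u, _ in items}
--     holders = {}
--     for u, qs in items:
--         for q in qs:
--             holders.setdefault(q, []).append(u)
--     for us in holders.values():
--         for u in us:
--             row = commom[u]
--             for v in us:
--                 row[v] += 1
--     return commom
-- ===== Notes on version B (the rewrite author's own statement) =====
-- stated objective: faster
-- what changed: B replaces A's all-pairs set intersections by an inverted index: it builds holders[q] = list of students having question q, initialises an all-zero matrix, and for each question increments every co-holder pair once, so no pairwise set intersection is ever computed.
import Mathlib
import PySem

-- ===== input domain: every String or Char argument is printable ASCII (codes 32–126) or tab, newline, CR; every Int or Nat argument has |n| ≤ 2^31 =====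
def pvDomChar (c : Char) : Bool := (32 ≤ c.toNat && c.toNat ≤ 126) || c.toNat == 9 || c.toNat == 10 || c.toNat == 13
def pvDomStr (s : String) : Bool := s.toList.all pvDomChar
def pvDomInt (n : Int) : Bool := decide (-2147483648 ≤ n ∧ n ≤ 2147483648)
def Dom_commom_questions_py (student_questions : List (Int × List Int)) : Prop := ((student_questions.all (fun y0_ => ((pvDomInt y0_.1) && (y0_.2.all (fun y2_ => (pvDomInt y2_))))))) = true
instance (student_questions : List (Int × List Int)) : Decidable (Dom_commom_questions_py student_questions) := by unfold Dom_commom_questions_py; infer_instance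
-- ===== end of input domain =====

-- B replaces A's all-pairs set intersections by an inverted index (per question,
-- increment every co-holder pair of an all-zero matrix); equality of the RETURN
-- values is what is proved.

-- ===== PORT A =====
-- body of A's inner loop (one iteration over student_v)
def pvStepA (uq : Int × List Int) (commom : PySem.Dict Int (PySem.Dict Int Int))
    (vq : Int × List Int) : PySem.Dict Int (PySem.Dict Int Int) :=
  let commom := if commom.contains uq.1 then commom else commom.insert uq.1 PySem.Dict.empty
  commom.insert uq.1 ((commom.getD uq.1 PySem.Dict.empty).insert vq.1
    (PySem.Set.len (PySem.Set.inter uq.2 vq.2)))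

def commom_questions_py (student_questions : List (Int × List Int)) : List (Int × List (Int × Int)) :=
  (student_questions.foldl
    (fun commom uq => student_questions.foldl (pvStepA uq) commom)
    PySem.Dict.empty).items.map (fun p => (p.1, p.2.items))

-- ===== PORT B =====
-- commom = {u: {v: 0 for v, _ in items} for u, _ in items}
def pvAltInit (student_questions : List (Int × List Int)) : PySem.Dict Int (PySem.Dict Int Int) :=
  student_questions.foldl
    (fun m uq => m.insert uq.1
      (student_questions.foldl (fun d vq => d.insert vq.1 0) PySem.Dict.empty))
    PySem.Dict.empty
-- holders.setdefault(q, []).append(u)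
def pvAltHolders (student_questions : List (Int × List Int)) : PySem.Dict Int (List Int) :=
  student_questions.foldl
    (fun h uq => uq.2.foldl (fun h q => h.insert q (h.getD q [] ++ [uq.1])) h)
    PySem.Dict.empty

def commom_questions_py_alt (student_questions : List (Int × List Int)) : List (Int × List (Int × Int)) :=
  -- for us in holders.values(): for u in us: for v in us: commom[u][v] += 1
  ((pvAltHolders student_questions).values.foldl
    (fun m us => us.foldl
      (fun m u => m.insert u
        (us.foldl (fun row v => row.insert v (row.getD v 0 + 1)) (m.getD u PySem.Dict.empty)))
      m)
    (pvAltInit student_questions)).items.map (fun p => (p.1, p.2.items))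

-- ===== PRECONDITION & SPEC =====
-- The argument models a Python dict[int, set[int]]: an association list with duplicate
-- keys, or with a duplicated element inside a value list, corresponds to no Python
-- input (a dict has unique keys and its values here are sets), so Pre_ excludes those.
def Pre_commom_questions_py (student_questions : List (Int × List Int)) : Prop :=
  (student_questions.map Prod.fst).Nodup ∧ ∀ p ∈ student_questions, p.2.Nodup
instance (student_questions : List (Int × List Int)) : Decidable (Pre_commom_questions_py student_questions) := by unfold Pre_commom_questions_py; infer_instance

def pvWitness_commom_questions_py : (List (Int × List Int)) := [(1, [10, 20]), (2, [20])]

def Spec_commom_questions_py (student_questions : List (Int × List Int)) (out : List (Int × List (Int × Int))) : Prop := out = commom_questions_py_alt student_questions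
instance (student_questions : List (Int × List Int)) (out : List (Int × List (Int × Int))) : Decidable (Spec_commom_questions_py student_questions out) := by unfold Spec_commom_questions_py; infer_instance

-- ===== CLAIM (what is proved, stated in full; the proofs are below) =====
def Claim_equal_commom_questions_py : Prop := ∀ (student_questions : List (Int × List Int)), Dom_commom_questions_py student_questions → Pre_commom_questions_py student_questions → Spec_commom_questions_py student_questions (commom_questions_py student_questions)

-- ===== LEMMAS AND PROOFS =====

def pvRow (vs : List (Int × List Int)) (qu : List Int) : List (Int × Int) :=
  vs.map (fun vq => (vq.1, PySem.Set.len (PySem.Set.inter qu vq.2)))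
theorem pvRow_keys (vs : List (Int × List Int)) (qu : List Int) :
    (pvRow vs qu).map Prod.fst = vs.map Prod.fst := by simp [pvRow]

theorem pv_contains_of_mem {ν : Type} (L : List (Int × ν)) (u : Int) (h : u ∈ L.map Prod.fst) :
    (PySem.Dict.mk L).contains u = true := by
  simp only [PySem.Dict.contains, List.any_eq_true]
  rcases List.mem_map.1 h with ⟨p, hp, hpu⟩
  exact ⟨p, hp, by simp [hpu]⟩
theorem pv_contains_of_not_mem {ν : Type} (L : List (Int × ν)) (u : Int) (h : u ∉ L.map Prod.fst) :
    (PySem.Dict.mk L).contains u = false := by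
  simp only [PySem.Dict.contains, List.any_eq_false]
  intro p hp
  simp only [beq_iff_eq]
  exact fun hpu => h (List.mem_map.2 ⟨p, hp, hpu⟩)
theorem pv_insert_fresh {ν : Type} (L : List (Int × ν)) (u : Int) (r : ν)
    (h : u ∉ L.map Prod.fst) :
    (PySem.Dict.mk L).insert u r = PySem.Dict.mk (L ++ [(u, r)]) := by
  simp [PySem.Dict.insert, pv_contains_of_not_mem L u h]
theorem pv_insert_mid {ν : Type} (L1 L2 : List (Int × ν)) (u : Int) (r r' : ν)
    (h1 : u ∉ L1.map Prod.fst) (h2 : u ∉ L2.map Prod.fst) :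
    (PySem.Dict.mk (L1 ++ (u, r) :: L2)).insert u r' = PySem.Dict.mk (L1 ++ (u, r') :: L2) := by
  have hc : (PySem.Dict.mk (L1 ++ (u, r) :: L2)).contains u = true := by
    apply pv_contains_of_mem; simp
  simp only [PySem.Dict.insert, hc, if_true]
  congr 1
  rw [List.map_append, List.map_cons]
  congr 1
  · apply List.map_congr_left (g := id) ?_ |>.trans (List.map_id _)
    intro p hp
    have : p.1 ≠ u := fun hpu => h1 (List.mem_map.2 ⟨p, hp, hpu⟩)
    simp [this]
  · simp only [beq_self_eq_true, if_true]
    congr 1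
    apply List.map_congr_left (g := id) ?_ |>.trans (List.map_id _)
    intro p hp
    have : p.1 ≠ u := fun hpu => h2 (List.mem_map.2 ⟨p, hp, hpu⟩)
    simp [this]
theorem pv_getD_mid {ν : Type} (L1 L2 : List (Int × ν)) (u : Int) (r d : ν)
    (h1 : u ∉ L1.map Prod.fst) :
    (PySem.Dict.mk (L1 ++ (u, r) :: L2)).getD u d = r := by
  simp only [PySem.Dict.getD, PySem.Dict.get?]
  rw [List.find?_append]
  have : List.find? (fun p => p.1 == u) L1 = none := by
    rw [List.find?_eq_none]
    intro p hp
    simp only [beq_iff_eq]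
    exact fun hpu => h1 (List.mem_map.2 ⟨p, hp, hpu⟩)
  simp [this]

theorem pv_innerA (u : Int) (qu : List Int) :
    ∀ (vs : List (Int × List Int)) (L : List (Int × PySem.Dict Int Int))
      (cs : List (Int × List Int)),
      u ∉ L.map Prod.fst → ((cs ++ vs).map Prod.fst).Nodup →
      vs.foldl (pvStepA (u, qu)) (PySem.Dict.mk (L ++ [(u, PySem.Dict.mk (pvRow cs qu))]))
        = PySem.Dict.mk (L ++ [(u, PySem.Dict.mk (pvRow (cs ++ vs) qu))]) := by
  intro vs
  induction vs with
  | nil => intro L cs _ _; simp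
  | cons vq vs ih =>
    intro L cs hL hnd
    rw [List.foldl_cons]
    have hstep : pvStepA (u, qu) (PySem.Dict.mk (L ++ [(u, PySem.Dict.mk (pvRow cs qu))])) vq
        = PySem.Dict.mk (L ++ [(u, PySem.Dict.mk (pvRow (cs ++ [vq]) qu))]) := by
      have hc : (PySem.Dict.mk (L ++ [(u, PySem.Dict.mk (pvRow cs qu))])).contains u = true := by
        apply pv_contains_of_mem; simp
      have hv : vq.1 ∉ (pvRow cs qu).map Prod.fst := by
        rw [pvRow_keys]
        intro hmem
        have hnd' : (cs.map Prod.fst ++ vq.1 :: vs.map Prod.fst).Nodup := by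
          simpa using hnd
        exact (List.disjoint_of_nodup_append hnd') hmem (by simp)
      simp only [pvStepA, hc, if_true]
      rw [pv_getD_mid L [] u _ _ hL, pv_insert_fresh _ _ _ hv, pv_insert_mid L [] u _ _ hL (by simp)]
      simp [pvRow]
    rw [hstep]
    have := ih L (cs ++ [vq]) hL (by simpa using hnd)
    simpa using this

def pvDone (sq as : List (Int × List Int)) : List (Int × PySem.Dict Int Int) :=
  as.map (fun uq => (uq.1, PySem.Dict.mk (pvRow sq uq.2)))
theorem pvDone_keys (sq as : List (Int × List Int)) :
    (pvDone sq as).map Prod.fst = as.map Prod.fst := by simp [pvDone]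

theorem pv_outerA (sq : List (Int × List Int)) (hkeys : (sq.map Prod.fst).Nodup) :
    ∀ (bs as : List (Int × List Int)), sq = as ++ bs →
      bs.foldl (fun commom uq => sq.foldl (pvStepA uq) commom) (PySem.Dict.mk (pvDone sq as))
        = PySem.Dict.mk (pvDone sq (as ++ bs)) := by
  intro bs
  induction bs with
  | nil => intro as _; simp
  | cons uq bs ih =>
    intro as hsq
    rw [List.foldl_cons]
    have huA : uq.1 ∉ (pvDone sq as).map Prod.fst := by
      rw [pvDone_keys]
      have h2 : (as.map Prod.fst ++ uq.1 :: bs.map Prod.fst).Nodup := by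
        simpa [hsq] using hkeys
      intro hmem
      exact (List.disjoint_of_nodup_append h2) hmem (by simp)
    have hstep : sq.foldl (pvStepA uq) (PySem.Dict.mk (pvDone sq as))
        = PySem.Dict.mk (pvDone sq (as ++ [uq])) := by
      have hne : sq ≠ [] := by rw [hsq]; simp
      obtain ⟨w, ws, hw⟩ := List.exists_cons_of_ne_nil hne
      rw [hw] at huA ⊢
      have hk2 : ((w :: ws).map Prod.fst).Nodup := by rw [← hw]; exact hkeys
      rw [List.foldl_cons]
      have hc0 : (PySem.Dict.mk (pvDone (w :: ws) as)).contains uq.1 = false :=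
        pv_contains_of_not_mem _ _ huA
      have hfirst : pvStepA uq (PySem.Dict.mk (pvDone (w :: ws) as)) w
          = PySem.Dict.mk (pvDone (w :: ws) as ++ [(uq.1, PySem.Dict.mk (pvRow [w] uq.2))]) := by
        simp only [pvStepA, hc0, if_false, Bool.false_eq_true]
        rw [pv_insert_fresh _ _ _ huA]
        rw [pv_getD_mid (pvDone (w :: ws) as) [] uq.1 _ _ huA,
            pv_insert_mid (pvDone (w :: ws) as) [] uq.1 _ _ huA (by simp)]
        have hemp : (PySem.Dict.empty : PySem.Dict Int Int).insert w.1
            (PySem.Set.len (PySem.Set.inter uq.2 w.2)) = PySem.Dict.mk (pvRow [w] uq.2) := by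
          simp [PySem.Dict.empty, PySem.Dict.insert, PySem.Dict.contains, pvRow]
        rw [hemp]
      rw [hfirst]
      have h3 := pv_innerA uq.1 uq.2 ws (pvDone (w :: ws) as) [w] huA (by simpa using hk2)
      rw [show (uq : Int × List Int) = (uq.1, uq.2) from rfl]
      rw [h3]
      simp [pvDone]
    rw [hstep]
    have := ih (as ++ [uq]) (by simpa using hsq)
    simpa using this

theorem pv_portA (sq : List (Int × List Int)) (hkeys : (sq.map Prod.fst).Nodup) :
    (sq.foldl (fun commom uq => sq.foldl (pvStepA uq) commom)
      (PySem.Dict.empty : PySem.Dict Int (PySem.Dict Int Int)))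
      = PySem.Dict.mk (pvDone sq sq) := by
  have h := pv_outerA sq hkeys sq [] rfl
  simpa [pvDone] using h

-- ----- B side: tabulated dictionaries -----

def pvTab {ν : Type} (ks : List Int) (g : Int → ν) : List (Int × ν) :=
  ks.map (fun k => (k, g k))

theorem pvTab_keys {ν : Type} (ks : List Int) (g : Int → ν) :
    (pvTab ks g).map Prod.fst = ks := by simp [pvTab, Function.comp_def]

theorem pvTab_congr {ν : Type} (ks : List Int) (g1 g2 : Int → ν)
    (h : ∀ k ∈ ks, g1 k = g2 k) : pvTab ks g1 = pvTab ks g2 :=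
  List.map_congr_left (fun k hk => by rw [h k hk])

theorem pv_split_of_mem_nodup (ks : List Int) (u : Int) (h : u ∈ ks) (hnd : ks.Nodup) :
    ∃ l1 l2, ks = l1 ++ u :: l2 ∧ u ∉ l1 ∧ u ∉ l2 := by
  obtain ⟨l1, l2, rfl⟩ := List.append_of_mem h
  rw [List.nodup_append] at hnd
  exact ⟨l1, l2, rfl, fun h1 => hnd.2.2 u h1 u (by simp) rfl, (List.nodup_cons.1 hnd.2.1).1⟩

theorem pvTab_getD {ν : Type} (ks : List Int) (g : Int → ν) (u : Int) (d : ν)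
    (h : u ∈ ks) (hnd : ks.Nodup) :
    (PySem.Dict.mk (pvTab ks g)).getD u d = g u := by
  obtain ⟨l1, l2, rfl, h1, _⟩ := pv_split_of_mem_nodup ks u h hnd
  have : pvTab (l1 ++ u :: l2) g = pvTab l1 g ++ (u, g u) :: pvTab l2 g := by simp [pvTab]
  rw [this, pv_getD_mid _ _ _ _ _ (by rw [pvTab_keys]; exact h1)]

theorem pvTab_getD_not_mem {ν : Type} (ks : List Int) (g : Int → ν) (u : Int) (d : ν)
    (h : u ∉ ks) :
    (PySem.Dict.mk (pvTab ks g)).getD u d = d := by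
  have hf : List.find? (fun p => p.1 == u) (pvTab ks g) = none := by
    rw [List.find?_eq_none]
    intro p hp
    unfold pvTab at hp
    rcases List.mem_map.1 hp with ⟨k, hk, rfl⟩
    simp only [beq_iff_eq]
    exact fun hpu => h (hpu ▸ hk)
  simp [PySem.Dict.getD, PySem.Dict.get?, hf]

theorem pvTab_insert_mem {ν : Type} (ks : List Int) (g : Int → ν) (u : Int) (w : ν)
    (h : u ∈ ks) (hnd : ks.Nodup) :
    (PySem.Dict.mk (pvTab ks g)).insert u w
      = PySem.Dict.mk (pvTab ks (fun k => if k = u then w else g k)) := by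
  obtain ⟨l1, l2, rfl, h1, h2⟩ := pv_split_of_mem_nodup ks u h hnd
  have e1 : pvTab (l1 ++ u :: l2) g = pvTab l1 g ++ (u, g u) :: pvTab l2 g := by simp [pvTab]
  rw [e1, pv_insert_mid _ _ _ _ _ (by rw [pvTab_keys]; exact h1) (by rw [pvTab_keys]; exact h2)]
  congr 1
  simp only [pvTab, List.map_append, List.map_cons]
  congr 1
  · exact (List.map_congr_left (fun k hk => by
      have : k ≠ u := fun he => h1 (he ▸ hk); simp [this])).symm
  · congr 1
    exact (List.map_congr_left (fun k hk => by
      have : k ≠ u := fun he => h2 (he ▸ hk); simp [this])).symm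

theorem pvTab_insert_fresh {ν : Type} (ks : List Int) (g : Int → ν) (u : Int) (w : ν)
    (h : u ∉ ks) :
    (PySem.Dict.mk (pvTab ks g)).insert u w = PySem.Dict.mk (pvTab ks g ++ [(u, w)]) :=
  pv_insert_fresh _ _ _ (by rw [pvTab_keys]; exact h)

theorem pv_build {ν : Type} (g : (Int × List Int) → ν) :
    ∀ (es : List (Int × List Int)) (L : List (Int × ν)),
      (∀ e ∈ es, e.1 ∉ L.map Prod.fst) → (es.map Prod.fst).Nodup →
      es.foldl (fun d e => d.insert e.1 (g e)) (PySem.Dict.mk L)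
        = PySem.Dict.mk (L ++ es.map (fun e => (e.1, g e))) := by
  intro es
  induction es with
  | nil => intro L _ _; simp
  | cons e es ih =>
    intro L hfresh hnd
    rw [List.foldl_cons, pv_insert_fresh L e.1 _ (hfresh e (by simp))]
    rw [ih (L ++ [(e.1, g e)]) ?_ hnd.of_cons]
    · simp
    · intro e' he'
      simp only [List.map_append, List.mem_append]
      rintro (h | h)
      · exact hfresh e' (by simp [he']) h
      · simp only [List.map_cons, List.map_nil, List.mem_cons, List.not_mem_nil, or_false] at h
        exact (List.nodup_cons.1 hnd).1 (h ▸ List.mem_map.2 ⟨e', he', rfl⟩)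

theorem pvTab_map_fst {ν : Type} (sq : List (Int × List Int)) (h : Int → ν) :
    pvTab (sq.map Prod.fst) h = sq.map (fun e => (e.1, h e.1)) := by
  unfold pvTab
  rw [List.map_map]
  rfl

-- the two-level tabulated matrix
def pvMat (ks : List Int) (f : Int → Int → Int) : PySem.Dict Int (PySem.Dict Int Int) :=
  PySem.Dict.mk (pvTab ks (fun u => PySem.Dict.mk (pvTab ks (fun v => f u v))))

theorem pvMat_congr (ks : List Int) (f1 f2 : Int → Int → Int)
    (h : ∀ u ∈ ks, ∀ v ∈ ks, f1 u v = f2 u v) : pvMat ks f1 = pvMat ks f2 := by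
  unfold pvMat
  congr 1
  exact pvTab_congr _ _ _ (fun u hu => by rw [pvTab_congr _ _ _ (fun v hv => h u hu v hv)])

-- inner bump loop: row[v] += 1 for v in vs
theorem pv_bump_inner (ks : List Int) (hnd : ks.Nodup) :
    ∀ (vs : List Int) (g : Int → Int), (∀ v ∈ vs, v ∈ ks) →
      vs.foldl (fun row v => row.insert v (row.getD v 0 + 1)) (PySem.Dict.mk (pvTab ks g))
        = PySem.Dict.mk (pvTab ks (fun k => g k + (vs.count k : Int))) := by
  intro vs
  induction vs with
  | nil => intro g _; simp
  | cons v vs ih =>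
    intro g hsub
    rw [List.foldl_cons, pvTab_getD ks g v 0 (hsub v (by simp)) hnd,
        pvTab_insert_mem ks g v _ (hsub v (by simp)) hnd,
        ih _ (fun x hx => hsub x (by simp [hx]))]
    congr 1
    apply pvTab_congr
    intro k _
    by_cases hk : k = v
    · subst hk; simp; ring
    · simp [hk, List.count_cons]
      exact fun h => hk h.symm

-- outer bump loop over ws (the port runs it with ws = us)
theorem pv_bump_outer (ks : List Int) (hnd : ks.Nodup) (us : List Int)
    (hus : ∀ v ∈ us, v ∈ ks) :
    ∀ (ws : List Int) (f : Int → Int → Int), (∀ u ∈ ws, u ∈ ks) →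
      ws.foldl (fun m u => m.insert u
          (us.foldl (fun row v => row.insert v (row.getD v 0 + 1)) (m.getD u PySem.Dict.empty)))
        (pvMat ks f)
        = pvMat ks (fun u v => f u v + (ws.count u : Int) * (us.count v : Int)) := by
  intro ws
  induction ws with
  | nil => intro f _; apply pvMat_congr; intro u _ v _; simp
  | cons u0 ws ih =>
    intro f hws
    rw [List.foldl_cons]
    have hu0 : u0 ∈ ks := hws u0 (by simp)
    have hrow : (pvMat ks f).getD u0 PySem.Dict.empty
        = PySem.Dict.mk (pvTab ks (fun v => f u0 v)) := pvTab_getD ks _ u0 _ hu0 hnd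
    rw [show (pvMat ks f) = PySem.Dict.mk (pvTab ks (fun u => PySem.Dict.mk (pvTab ks (fun v => f u v)))) from rfl] at hrow ⊢
    rw [hrow, pv_bump_inner ks hnd us _ hus, pvTab_insert_mem ks _ u0 _ hu0 hnd]
    have e1 : pvTab ks (fun k => if k = u0
          then PySem.Dict.mk (pvTab ks fun k => f u0 k + (us.count k : Int))
          else PySem.Dict.mk (pvTab ks fun v => f k v))
        = pvTab ks (fun u => PySem.Dict.mk (pvTab ks (fun v =>
            (fun u v => if u = u0 then f u v + (us.count v : Int) else f u v) u v))) := by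
      apply pvTab_congr
      intro k _
      by_cases hk : k = u0
      · subst hk; simp
      · simp [hk]
    rw [e1]
    rw [show (PySem.Dict.mk (pvTab ks (fun u => PySem.Dict.mk (pvTab ks (fun v =>
        (fun u v => if u = u0 then f u v + (us.count v : Int) else f u v) u v)))))
      = pvMat ks (fun u v => if u = u0 then f u v + (us.count v : Int) else f u v) from rfl]
    rw [ih _ (fun x hx => hws x (by simp [hx]))]
    apply pvMat_congr
    intro u _ v _
    by_cases hu : u = u0
    · subst hu; simp; ring
    · simp [hu, Ne.symm hu]

-- folding the bump phase over a list of holder lists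
theorem pv_bump_all (ks : List Int) (hnd : ks.Nodup) (Hl : Int → List Int) :
    ∀ (qs : List Int) (f : Int → Int → Int), (∀ q ∈ qs, ∀ v ∈ Hl q, v ∈ ks) →
      ((qs.map Hl).foldl
        (fun m us => us.foldl
          (fun m u => m.insert u
            (us.foldl (fun row v => row.insert v (row.getD v 0 + 1)) (m.getD u PySem.Dict.empty)))
          m)
        (pvMat ks f))
        = pvMat ks (fun u v => f u v
            + (qs.map (fun q => ((Hl q).count u : Int) * ((Hl q).count v : Int))).sum) := by
  intro qs
  induction qs with
  | nil => intro f _; apply pvMat_congr; intro u _ v _; simp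
  | cons q qs ih =>
    intro f hsub
    rw [List.map_cons, List.foldl_cons,
        pv_bump_outer ks hnd (Hl q) (hsub q (by simp)) (Hl q) f (hsub q (by simp)),
        ih _ (fun q' hq' => hsub q' (by simp [hq']))]
    apply pvMat_congr
    intro u _ v _
    simp [List.sum_cons]
    ring

-- ----- holders characterisation -----

def pvFlat (sq : List (Int × List Int)) : List Int := sq.flatMap (fun e => e.2)
def pvHold (sq : List (Int × List Int)) (q : Int) : List Int :=
  (sq.filter (fun e => decide (q ∈ e.2))).map Prod.fst

theorem pvHold_nil_of_not_mem (sq : List (Int × List Int)) (q : Int) (h : q ∉ pvFlat sq) :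
    pvHold sq q = [] := by
  unfold pvHold
  rw [List.filter_eq_nil_iff.2, List.map_nil]
  intro e he
  simp only [decide_eq_true_eq]
  exact fun hq => h (List.mem_flatMap.2 ⟨e, he, hq⟩)

theorem pv_hold_inner (ts : List (Int × List Int)) (uid : Int) :
    ∀ (rem p : List Int), (p ++ rem).Nodup →
      rem.foldl (fun h q => h.insert q (h.getD q [] ++ [uid]))
        (PySem.Dict.mk (pvTab (PySem.List.dedup (pvFlat ts ++ p))
          (fun q => pvHold ts q ++ if q ∈ p then [uid] else [])))
      = PySem.Dict.mk (pvTab (PySem.List.dedup (pvFlat ts ++ (p ++ rem)))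
          (fun q => pvHold ts q ++ if q ∈ p ++ rem then [uid] else [])) := by
  intro rem
  induction rem with
  | nil => intro p _; simp
  | cons q0 rem ih =>
    intro p hnd
    have hq0p : q0 ∉ p := fun h => (List.disjoint_of_nodup_append hnd) h (by simp)
    have hndK : (PySem.List.dedup (pvFlat ts ++ p)).Nodup := by
      simp only [PySem.List.dedup_eq_ofList]; exact PySem.Set.nodup_ofList _
    rw [List.foldl_cons]
    have hstep :
        (PySem.Dict.mk (pvTab (PySem.List.dedup (pvFlat ts ++ p))
            (fun q => pvHold ts q ++ if q ∈ p then [uid] else []))).insert q0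
          ((PySem.Dict.mk (pvTab (PySem.List.dedup (pvFlat ts ++ p))
            (fun q => pvHold ts q ++ if q ∈ p then [uid] else []))).getD q0 [] ++ [uid])
        = PySem.Dict.mk (pvTab (PySem.List.dedup (pvFlat ts ++ (p ++ [q0])))
            (fun q => pvHold ts q ++ if q ∈ p ++ [q0] then [uid] else [])) := by
      by_cases hmem : q0 ∈ pvFlat ts
      · have hK : q0 ∈ PySem.List.dedup (pvFlat ts ++ p) := by
          simp only [PySem.List.dedup_eq_ofList]
          exact (PySem.Set.mem_ofList _ _).2 (by simp [hmem])
        rw [pvTab_getD _ _ _ _ hK hndK, pvTab_insert_mem _ _ _ _ hK hndK]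
        have hkeys : PySem.List.dedup (pvFlat ts ++ (p ++ [q0]))
            = PySem.List.dedup (pvFlat ts ++ p) := by
          simp only [PySem.List.dedup_eq_ofList, ← List.append_assoc]
          rw [PySem.Set.ofList_append_singleton, PySem.Set.add_of_mem]
          exact (PySem.Set.mem_ofList _ _).2 (by simp [hmem])
        rw [hkeys]
        congr 1
        apply pvTab_congr
        intro k _
        by_cases hk : k = q0
        · subst hk; simp [hq0p]
        · simp [hk]
      · have hK : q0 ∉ PySem.List.dedup (pvFlat ts ++ p) := by
          simp only [PySem.List.dedup_eq_ofList]
          intro h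
          rcases List.mem_append.1 ((PySem.Set.mem_ofList _ _).1 h) with h | h
          · exact hmem h
          · exact hq0p h
        rw [pvTab_getD_not_mem _ _ _ _ hK, pvTab_insert_fresh _ _ _ _ hK]
        have hkeys : PySem.List.dedup (pvFlat ts ++ (p ++ [q0]))
            = PySem.List.dedup (pvFlat ts ++ p) ++ [q0] := by
          simp only [PySem.List.dedup_eq_ofList, ← List.append_assoc]
          rw [PySem.Set.ofList_append_singleton, PySem.Set.add_of_not_mem]
          intro h
          rcases List.mem_append.1 ((PySem.Set.mem_ofList _ _).1 h) with h | h
          · exact hmem h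
          · exact hq0p h
        rw [hkeys]
        congr 1
        unfold pvTab
        rw [List.map_append]
        congr 1
        · apply List.map_congr_left
          intro k hk
          have hkq : k ≠ q0 := fun he => hK (he ▸ hk)
          simp [hkq]
        · simp [pvHold_nil_of_not_mem ts q0 hmem]
    rw [hstep]
    have := ih (p ++ [q0]) (by simpa using hnd)
    simpa using this

theorem pv_holders (sq : List (Int × List Int)) (hvals : ∀ e ∈ sq, e.2.Nodup) :
    sq.foldl (fun h uq => uq.2.foldl (fun h q => h.insert q (h.getD q [] ++ [uq.1])) h)
      PySem.Dict.empty
    = PySem.Dict.mk (pvTab (PySem.List.dedup (pvFlat sq)) (pvHold sq)) := by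
  induction sq using List.reverseRecOn with
  | nil =>
    simp [pvFlat, pvTab, PySem.Dict.empty, PySem.List.dedup_eq_ofList, PySem.Set.ofList_nil]
  | append_singleton ts e ih =>
    rw [List.foldl_append, List.foldl_cons, List.foldl_nil,
        ih (fun x hx => hvals x (by simp [hx]))]
    have h0 : PySem.Dict.mk (pvTab (PySem.List.dedup (pvFlat ts)) (pvHold ts))
        = PySem.Dict.mk (pvTab (PySem.List.dedup (pvFlat ts ++ ([] : List Int)))
            (fun q => pvHold ts q ++ if q ∈ ([] : List Int) then [e.1] else [])) := by
      simp
    rw [h0, pv_hold_inner ts e.1 e.2 [] (by simpa using hvals e (by simp))]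
    have hflat : pvFlat (ts ++ [e]) = pvFlat ts ++ e.2 := by
      simp [pvFlat]
    rw [show pvFlat ts ++ ([] ++ e.2) = pvFlat (ts ++ [e]) by simp [hflat]]
    congr 1
    apply pvTab_congr
    intro q _
    simp only [List.nil_append]
    unfold pvHold
    rw [List.filter_append, List.map_append]
    congr 1
    by_cases hq : q ∈ e.2 <;> simp [hq]

-- ----- counting -----

theorem pv_count_nodup (l : List Int) (hnd : l.Nodup) (a : Int) :
    l.count a = if a ∈ l then 1 else 0 := by
  by_cases h : a ∈ l
  · simp only [h, if_true]
    exact List.count_eq_one_of_mem hnd h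
  · simp [h, List.count_eq_zero_of_not_mem]

theorem pvHold_nodup (sq : List (Int × List Int)) (hkeys : (sq.map Prod.fst).Nodup) (q : Int) :
    (pvHold sq q).Nodup := by
  unfold pvHold
  exact List.Nodup.sublist (List.Sublist.map Prod.fst List.filter_sublist) hkeys

theorem pvHold_mem (sq : List (Int × List Int)) (hkeys : (sq.map Prod.fst).Nodup)
    (e : Int × List Int) (he : e ∈ sq) (q : Int) :
    e.1 ∈ pvHold sq q ↔ q ∈ e.2 := by
  unfold pvHold
  constructor
  · intro h
    rcases List.mem_map.1 h with ⟨x, hx, hxe⟩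
    rcases List.mem_filter.1 hx with ⟨hxsq, hxq⟩
    have : x = e := List.inj_on_of_nodup_map hkeys hxsq he hxe
    rw [← this]
    exact of_decide_eq_true hxq
  · intro h
    exact List.mem_map.2 ⟨e, List.mem_filter.2 ⟨he, decide_eq_true h⟩, rfl⟩

theorem pv_len_eq_of_same_mem (xs ys : List Int) (hx : xs.Nodup) (hy : ys.Nodup)
    (h : ∀ a, a ∈ xs ↔ a ∈ ys) : xs.length = ys.length := by
  rw [← List.toFinset_card_of_nodup hx, ← List.toFinset_card_of_nodup hy]
  congr 1
  ext a
  simp [h a]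

theorem pv_count_sum (sq : List (Int × List Int)) (hkeys : (sq.map Prod.fst).Nodup)
    (hvals : ∀ e ∈ sq, e.2.Nodup) (e e' : Int × List Int) (he : e ∈ sq) (he' : e' ∈ sq) :
    ((PySem.List.dedup (pvFlat sq)).map
        (fun q => ((pvHold sq q).count e.1 : Int) * ((pvHold sq q).count e'.1 : Int))).sum
      = PySem.Set.len (PySem.Set.inter e.2 e'.2) := by
  have hterm : ∀ q, ((pvHold sq q).count e.1 : Int) * ((pvHold sq q).count e'.1 : Int)
      = if q ∈ e.2 ∧ q ∈ e'.2 then 1 else 0 := by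
    intro q
    rw [pv_count_nodup _ (pvHold_nodup sq hkeys q) e.1,
        pv_count_nodup _ (pvHold_nodup sq hkeys q) e'.1]
    by_cases h1 : q ∈ e.2 <;> by_cases h2 : q ∈ e'.2 <;>
      simp [(pvHold_mem sq hkeys e he q), (pvHold_mem sq hkeys e' he' q), h1, h2]
  have hmap : (PySem.List.dedup (pvFlat sq)).map
        (fun q => ((pvHold sq q).count e.1 : Int) * ((pvHold sq q).count e'.1 : Int))
      = (PySem.List.dedup (pvFlat sq)).map
        (fun q => if q ∈ e.2 ∧ q ∈ e'.2 then (1 : Int) else 0) :=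
    List.map_congr_left (fun q _ => hterm q)
  rw [hmap]
  have hsum : ((PySem.List.dedup (pvFlat sq)).map
        (fun q => if q ∈ e.2 ∧ q ∈ e'.2 then (1 : Int) else 0)).sum
      = (((PySem.List.dedup (pvFlat sq)).filter
          (fun q => decide (q ∈ e.2 ∧ q ∈ e'.2))).length : Int) := by
    induction PySem.List.dedup (pvFlat sq) with
    | nil => simp
    | cons q qs ih =>
      by_cases h : q ∈ e.2 ∧ q ∈ e'.2
      · simp [h, ih]; ring
      · simp [h, ih]
  rw [hsum]
  have hlen : ((PySem.List.dedup (pvFlat sq)).filter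
        (fun q => decide (q ∈ e.2 ∧ q ∈ e'.2))).length
      = (e.2.filter (fun v => e'.2.contains v)).length := by
    apply pv_len_eq_of_same_mem
    · exact List.Nodup.filter _ (by
        simp only [PySem.List.dedup_eq_ofList]; exact PySem.Set.nodup_ofList _)
    · exact List.Nodup.filter _ (hvals e he)
    · intro a
      simp only [List.mem_filter, decide_eq_true_eq, List.contains_eq_mem, PySem.List.dedup_eq_ofList,
        PySem.Set.mem_ofList]
      constructor
      · rintro ⟨_, h1, h2⟩; exact ⟨h1, h2⟩
      · rintro ⟨h1, h2⟩
        exact ⟨List.mem_flatMap.2 ⟨e, he, h1⟩, h1, h2⟩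
  simp only [PySem.Set.len, PySem.Set.inter, PySem.Set.contains]
  rw [hlen]

-- ----- assembly of B's port -----

theorem pv_portB (sq : List (Int × List Int)) (hkeys : (sq.map Prod.fst).Nodup)
    (hvals : ∀ e ∈ sq, e.2.Nodup) :
    commom_questions_py_alt sq = (PySem.Dict.mk (pvDone sq sq)).items.map (fun p => (p.1, p.2.items)) := by
  unfold commom_questions_py_alt pvAltInit pvAltHolders
  -- the zero row
  have hzero : sq.foldl (fun d vq => d.insert vq.1 (0 : Int)) PySem.Dict.empty
      = PySem.Dict.mk (pvTab (sq.map Prod.fst) (fun _ => (0 : Int))) := by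
    rw [show (PySem.Dict.empty : PySem.Dict Int Int) = PySem.Dict.mk [] from rfl,
        pv_build (fun _ => (0 : Int)) sq [] (by simp) hkeys, pvTab_map_fst]
    simp
  -- the initial all-zero matrix
  have hinit : sq.foldl
      (fun m uq => m.insert uq.1
        (sq.foldl (fun d vq => d.insert vq.1 (0 : Int)) PySem.Dict.empty))
      PySem.Dict.empty
      = pvMat (sq.map Prod.fst) (fun _ _ => 0) := by
    rw [show (PySem.Dict.empty : PySem.Dict Int (PySem.Dict Int Int)) = PySem.Dict.mk [] from rfl,
        pv_build (fun _ => sq.foldl (fun d vq => d.insert vq.1 (0 : Int)) PySem.Dict.empty)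
          sq [] (by simp) hkeys]
    unfold pvMat
    rw [pvTab_map_fst]
    simp only [List.nil_append]
    congr 1
    apply List.map_congr_left
    intro e _
    rw [hzero, pvTab_map_fst]
  rw [hinit, pv_holders sq hvals]
  -- the values of holders
  have hvalues : (PySem.Dict.mk (pvTab (PySem.List.dedup (pvFlat sq)) (pvHold sq))).values
      = (PySem.List.dedup (pvFlat sq)).map (pvHold sq) := by
    simp [PySem.Dict.values, pvTab, Function.comp]
  rw [hvalues,
      pv_bump_all (sq.map Prod.fst) hkeys (pvHold sq) (PySem.List.dedup (pvFlat sq))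
        (fun _ _ => 0)
        (fun q _ v hv => by
          unfold pvHold at hv
          rcases List.mem_map.1 hv with ⟨x, hx, rfl⟩
          exact List.mem_map.2 ⟨x, (List.mem_filter.1 hx).1, rfl⟩)]
  -- the resulting matrix is A's matrix
  have hfinal : pvMat (sq.map Prod.fst)
      (fun u v => 0 + ((PySem.List.dedup (pvFlat sq)).map
        (fun q => ((pvHold sq q).count u : Int) * ((pvHold sq q).count v : Int))).sum)
      = PySem.Dict.mk (pvDone sq sq) := by
    unfold pvMat pvDone
    rw [pvTab_map_fst]
    congr 1
    apply List.map_congr_left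
    intro e he
    rw [pvTab_map_fst]
    unfold pvRow
    congr 1
    congr 1
    apply List.map_congr_left
    intro e' he'
    congr 1
    simp only [zero_add]
    exact pv_count_sum sq hkeys hvals e e' he he'
  rw [hfinal]

-- ===== VERDICT (by name: the statement is the Claim_ definition above) =====
theorem commom_questions_py_spec : Claim_equal_commom_questions_py := by
  intro sq _hdom hpre
  obtain ⟨hkeys, hvals⟩ := hpre
  unfold Spec_commom_questions_py commom_questions_py
  rw [pv_portA sq hkeys, pv_portB sq hkeys hvals]
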